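-- pv_equiv track=rewrite | github.com/plxgxx/blackout | logic.py | get_time_ranges
-- ===== SOURCE A (Python) =====
-- from typing import List
--
-- def get_time_ranges(day_to_get_time_ranges: List[int]) -> dict:
--     """
--     :param day_to_get_schedule: list of states for the specific day in the group
--     :return: dict in the form of {state: [time_range]}
--     """
--     state_begin_index = 0
--     state_begin = day_to_get_time_ranges["1"]
--     dict_timeframes = {}
--     for ii in range(1, len(day_to_get_time_ranges)+1):
--         if state_begin != day_to_get_time_ranges[str(ii)]:
--             try:
--                 dict_timeframes[state_begin].append([state_begin_index, ii - 1])
--             except KeyError: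
--                 dict_timeframes[state_begin] = [[state_begin_index, ii - 1]]
--             state_begin_index = ii - 1
--             state_begin = day_to_get_time_ranges[str(ii)]
--         else:
--             pass
--
--         if ii == len(day_to_get_time_ranges):
--             try:
--                 dict_timeframes[state_begin].append([state_begin_index, ii])
--             except KeyError:
--                 dict_timeframes[state_begin] = [[state_begin_index, ii]]
--
--     dict_timeframes = dict(sorted(dict_timeframes.items()))
--     return dict_timeframes
-- ===== SOURCE B (Python) =====
-- def get_time_ranges(day_to_get_time_ranges):
--     if not day_to_get_time_ranges:
--         return {}
--     n = len(day_to_get_time_ranges)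
--     vals = [day_to_get_time_ranges[str(i)] for i in range(1, n + 1)]
--     cuts = [0] + [i for i, (a, b) in enumerate(zip(vals, vals[1:]), 1) if a != b] + [n]
--     ranges = list(zip(cuts, cuts[1:]))
--     return {s: [[lo, hi] for lo, hi in ranges if vals[lo] == s]
--             for s in sorted(set(vals))}
-- ===== Notes on version B (the rewrite author's own statement) =====
-- stated objective: alternative
-- what changed: Instead of A's incremental state machine that mutates a dict of lists while scanning, B works in independent staged passes: it detects cut positions by pairwise comparison of zip(vals, vals[1:]), zips the cut list with itself to form the ranges, and then builds the result per distinct state by filtering the range list for each state of sorted(set(vals)).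
-- crash fix: On the empty dict A raises KeyError at the unconditional d["1"] access while B naturally returns {}. — e.g. on get_time_ranges([]): A raises KeyError, B returns []
import Mathlib
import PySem

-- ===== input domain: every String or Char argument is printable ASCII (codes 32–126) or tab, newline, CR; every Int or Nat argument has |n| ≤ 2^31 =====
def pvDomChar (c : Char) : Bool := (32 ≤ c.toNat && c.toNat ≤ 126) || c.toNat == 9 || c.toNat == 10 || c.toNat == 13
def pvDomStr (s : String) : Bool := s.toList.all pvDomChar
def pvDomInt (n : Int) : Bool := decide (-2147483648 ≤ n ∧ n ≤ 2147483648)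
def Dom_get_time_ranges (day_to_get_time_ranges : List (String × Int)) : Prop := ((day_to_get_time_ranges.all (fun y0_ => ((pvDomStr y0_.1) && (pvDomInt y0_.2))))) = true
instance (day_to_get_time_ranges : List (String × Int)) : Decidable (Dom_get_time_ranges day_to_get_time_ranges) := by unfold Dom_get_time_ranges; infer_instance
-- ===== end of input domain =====

-- B replaces A's incremental state machine (which mutates a dict of range lists while
-- scanning) by staged passes: pairwise cut detection on zip(vals, vals[1:]), ranges by
-- zipping the cut list with itself, and one filtering pass per sorted distinct state.
-- Objective: alternative (same task, genuinely different decomposition, no speed claim).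
-- ===== PORT A =====
-- try: dict_timeframes[k].append([lo, hi]) except KeyError: dict_timeframes[k] = [[lo, hi]]
def pushA (dt : PySem.Dict Int (List (List Int))) (k lo hi : Int) : PySem.Dict Int (List (List Int)) :=
  match dt.get? k with
  | some l => dt.insert k (l ++ [[lo, hi]])
  | none => dt.insert k [[lo, hi]]

-- the body of A's for-loop over ii (state = (state_begin_index, state_begin, dict_timeframes))
def bodyA (d : PySem.Dict String Int) (n : Int)
    (st : Int × Int × PySem.Dict Int (List (List Int))) (ii : Int) :
    Int × Int × PySem.Dict Int (List (List Int)) :=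
  let st := if st.2.1 ≠ d.getD (PySem.Int.toStr ii) 0 then
      (ii - 1, d.getD (PySem.Int.toStr ii) 0, pushA st.2.2 st.2.1 st.1 (ii - 1))
    else st
  if ii = n then (st.1, st.2.1, pushA st.2.2 st.2.1 st.1 ii) else st

def get_time_ranges (day_to_get_time_ranges : List (String × Int)) : List (Int × List (List Int)) :=
  let d := PySem.Dict.ofList day_to_get_time_ranges
  let n : Int := (d.size : Int)
  -- Pre_ guarantees key "1" (and every str(ii), 1 ≤ ii ≤ n) is present, so getD never
  -- takes its default on admitted inputs (Python raises KeyError exactly there).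
  let st := (PySem.List.pyRange 1 (n + 1) 1).foldl (bodyA d n)
    (0, d.getD "1" 0, PySem.Dict.empty)
  -- sorted(d.items()): keys are distinct, so tuple comparison = comparison on the key
  PySem.List.sorted st.2.2.items (fun p => p.1) false

-- ===== PORT B =====
def get_time_ranges_alt (day_to_get_time_ranges : List (String × Int)) : List (Int × List (List Int)) :=
  if day_to_get_time_ranges = [] then [] else
  let d := PySem.Dict.ofList day_to_get_time_ranges
  let n : Int := (d.size : Int)
  let vals := (PySem.List.pyRange 1 (n + 1) 1).map (fun i => d.getD (PySem.Int.toStr i) 0)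
  -- cuts = [0] + [i for i, (a, b) in enumerate(zip(vals, vals[1:]), 1) if a != b] + [n]
  let cuts : List Int :=
    0 :: (((PySem.List.enumerate (vals.zip (PySem.List.slice vals (some 1))) 1).filter
      (fun p => p.2.1 != p.2.2)).map (fun p => p.1) ++ [n])
  -- ranges = list(zip(cuts, cuts[1:]))
  let ranges := cuts.zip (PySem.List.slice cuts (some 1))
  -- {s: [[lo, hi] for lo, hi in ranges if vals[lo] == s] for s in sorted(set(vals))}
  -- vals[lo]: every lo here satisfies 0 ≤ lo < len(vals), so pyGetD's default is never taken
  (PySem.List.sorted (PySem.Set.ofList vals) (fun x => x) false).map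
    (fun s => (s, (ranges.filter (fun p => PySem.List.pyGetD vals p.1 0 == s)).map
      (fun p => [p.1, p.2])))

-- ===== PRECONDITION & SPEC =====
-- Pre_: exactly the inputs where the Python A returns (A raises KeyError iff key "1"
-- or some key str(ii), 1 ≤ ii ≤ len, is missing from the dict).
def Pre_get_time_ranges (day_to_get_time_ranges : List (String × Int)) : Prop :=
  day_to_get_time_ranges ≠ [] ∧
  ((PySem.List.pyRange 1 ((PySem.Dict.ofList day_to_get_time_ranges).size + 1) 1).all
    (fun i => (PySem.Dict.ofList day_to_get_time_ranges).contains (PySem.Int.toStr i))) = true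

instance (day_to_get_time_ranges : List (String × Int)) : Decidable (Pre_get_time_ranges day_to_get_time_ranges) := by
  unfold Pre_get_time_ranges; infer_instance

def pvWitness_get_time_ranges : (List (String × Int)) := [("1", 5), ("2", 5), ("3", 0)]

-- On the empty dict A raises KeyError at the unconditional d["1"] access while B naturally returns {}.
def Raises_get_time_ranges (day_to_get_time_ranges : List (String × Int)) : Prop :=
  day_to_get_time_ranges = []

instance (day_to_get_time_ranges : List (String × Int)) : Decidable (Raises_get_time_ranges day_to_get_time_ranges) := by
  unfold Raises_get_time_ranges; infer_instance

def pvRaiseWitness_get_time_ranges : (List (String × Int)) := []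

def pvRaiseWitnessOut_get_time_ranges : List (Int × List (List Int)) := []

def Spec_get_time_ranges (day_to_get_time_ranges : List (String × Int)) (out : List (Int × List (List Int))) : Prop := out = get_time_ranges_alt day_to_get_time_ranges
instance (day_to_get_time_ranges : List (String × Int)) (out : List (Int × List (List Int))) : Decidable (Spec_get_time_ranges day_to_get_time_ranges out) := by unfold Spec_get_time_ranges; infer_instance

-- ===== CLAIM (what is proved, stated in full; the proofs are below) =====
def Claim_equal_get_time_ranges : Prop := ∀ (day_to_get_time_ranges : List (String × Int)), Dom_get_time_ranges day_to_get_time_ranges → Pre_get_time_ranges day_to_get_time_ranges → Spec_get_time_ranges day_to_get_time_ranges (get_time_ranges day_to_get_time_ranges)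

def Claim_raises_get_time_ranges : Prop := (∀ (day_to_get_time_ranges : List (String × Int)), Dom_get_time_ranges day_to_get_time_ranges → Raises_get_time_ranges day_to_get_time_ranges → ¬ Pre_get_time_ranges day_to_get_time_ranges) ∧ (Dom_get_time_ranges (pvRaiseWitness_get_time_ranges) ∧ Raises_get_time_ranges (pvRaiseWitness_get_time_ranges) ∧ get_time_ranges_alt (pvRaiseWitness_get_time_ranges) = pvRaiseWitnessOut_get_time_ranges)

-- ===== LEMMAS AND PROOFS =====

-- proof-side view of A's appends: setdefault-style modify
def pushB (dt : PySem.Dict Int (List (List Int))) (k lo hi : Int) : PySem.Dict Int (List (List Int)) :=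
  dt.modify k [] (· ++ [[lo, hi]])

theorem push_eq (dt : PySem.Dict Int (List (List Int))) (k lo hi : Int) :
    pushA dt k lo hi = pushB dt k lo hi := by
  unfold pushA pushB PySem.Dict.modify
  rw [PySem.Dict.getD_eq_get?_getD]
  cases dt.get? k <;> rfl

-- A's loop, rephrased as a branchy recursion over the remaining values,
-- carrying the Python loop index ii, the run-start index sbi, the state sb and the dict
def procA (n : Int) : List Int → Int → Int → Int → PySem.Dict Int (List (List Int)) → PySem.Dict Int (List (List Int))
  | [], _, _, _, dt => dt
  | v :: rest, ii, sbi, sb, dt =>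
    if sb = v then
      if ii = n then procA n rest (ii + 1) sbi sb (pushA dt sb sbi ii)
      else procA n rest (ii + 1) sbi sb dt
    else
      if ii = n then
        procA n rest (ii + 1) (ii - 1) v (pushA (pushA dt sb sbi (ii - 1)) v (ii - 1) ii)
      else procA n rest (ii + 1) (ii - 1) v (pushA dt sb sbi (ii - 1))

theorem procA_cons (n v : Int) (rest : List Int) (ii sbi sb : Int)
    (dt : PySem.Dict Int (List (List Int))) :
    procA n (v :: rest) ii sbi sb dt =
    (if sb = v then
      if ii = n then procA n rest (ii + 1) sbi sb (pushA dt sb sbi ii)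
      else procA n rest (ii + 1) sbi sb dt
    else
      if ii = n then
        procA n rest (ii + 1) (ii - 1) v (pushA (pushA dt sb sbi (ii - 1)) v (ii - 1) ii)
      else procA n rest (ii + 1) (ii - 1) v (pushA dt sb sbi (ii - 1))) := rfl

-- run-length encoding of the value sequence (proof-side intermediate)
def runsAux (x c : Int) : List Int → List (Int × Int)
  | [] => [(x, c)]
  | y :: ys => if y = x then runsAux x (c + 1) ys else (x, c) :: runsAux y 1 ys

def runs : List Int → List (Int × Int)
  | [] => []
  | x :: xs => runsAux x 1 xs

theorem runsAux_cons (x c y : Int) (ys : List Int) :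
    runsAux x c (y :: ys) =
    (if y = x then runsAux x (c + 1) ys else (x, c) :: runsAux y 1 ys) := rfl

def bodyB (st : Int × PySem.Dict Int (List (List Int))) (p : Int × Int) :
    Int × PySem.Dict Int (List (List Int)) :=
  (st.1 + p.2, pushB st.2 p.1 st.1 (st.1 + p.2))

-- bodyA applied to a concrete state, by cases on the two conditions
theorem bodyA_app (d : PySem.Dict String Int) (n sbi sb : Int)
    (dt : PySem.Dict Int (List (List Int))) (ii : Int) :
    bodyA d n (sbi, sb, dt) ii =
    (if sb = d.getD (PySem.Int.toStr ii) 0 then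
      if ii = n then (sbi, sb, pushA dt sb sbi ii) else (sbi, sb, dt)
    else
      if ii = n then
        (ii - 1, d.getD (PySem.Int.toStr ii) 0,
          pushA (pushA dt sb sbi (ii - 1)) (d.getD (PySem.Int.toStr ii) 0) (ii - 1) ii)
      else (ii - 1, d.getD (PySem.Int.toStr ii) 0, pushA dt sb sbi (ii - 1))) := by
  unfold bodyA
  by_cases hn : ii = n
  · subst hn
    by_cases hv : sb = d.getD (PySem.Int.toStr ii) 0 <;> simp [hv]
  · by_cases hv : sb = d.getD (PySem.Int.toStr ii) 0 <;> simp [hv, hn]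

-- bridge: A's foldl over the index range IS procA over the mapped-out values
theorem bridge (d : PySem.Dict String Int) (n : Int) :
    ∀ (k : Nat) (a sbi sb : Int) (dt : PySem.Dict Int (List (List Int))),
    a = n + 1 - k →
    ((PySem.List.pyRange a (n + 1) 1).foldl (bodyA d n) (sbi, sb, dt)).2.2 =
    procA n ((PySem.List.pyRange a (n + 1) 1).map (fun i => d.getD (PySem.Int.toStr i) 0))
      a sbi sb dt := by
  intro k
  induction k with
  | zero =>
    intro a sbi sb dt ha
    rw [PySem.List.pyRange_one_eq_nil (by omega)]
    rfl
  | succ m ih =>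
    intro a sbi sb dt ha
    by_cases hab : a < n + 1
    · rw [PySem.List.pyRange_one_cons hab]
      rw [List.map_cons, List.foldl_cons, procA_cons, bodyA_app]
      by_cases hv : sb = d.getD (PySem.Int.toStr a) 0 <;> by_cases hn : a = n
      · rw [if_pos hv, if_pos hv, if_pos hn, if_pos hn]; exact ih (a + 1) _ _ _ (by omega)
      · rw [if_pos hv, if_pos hv, if_neg hn, if_neg hn]; exact ih (a + 1) _ _ _ (by omega)
      · rw [if_neg hv, if_neg hv, if_pos hn, if_pos hn]; exact ih (a + 1) _ _ _ (by omega)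
      · rw [if_neg hv, if_neg hv, if_neg hn, if_neg hn]; exact ih (a + 1) _ _ _ (by omega)
    · rw [PySem.List.pyRange_one_eq_nil (by omega)]
      rfl

-- the heart of the A side: A's state machine over the current run's continuation equals
-- the fold of bodyB over the run-length encoding, given ii = sbi + c + 1 and end at n
theorem main_lemma (n : Int) :
    ∀ (tail : List Int) (v ii sbi sb c : Int) (dt : PySem.Dict Int (List (List Int))),
    ii = sbi + c + 1 → ii + tail.length = n →
    procA n (v :: tail) ii sbi sb dt =
    ((runsAux sb c (v :: tail)).foldl bodyB (sbi, dt)).2 := by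
  intro tail
  induction tail with
  | nil =>
    intro v ii sbi sb c dt h1 h2
    simp only [List.length_nil, Nat.cast_zero, Int.add_zero] at h2
    rw [procA_cons, runsAux_cons]
    by_cases hv : sb = v
    · rw [if_pos hv, if_pos h2, if_pos hv.symm]
      simp only [procA, runsAux, List.foldl_cons, List.foldl_nil, bodyB, push_eq]
      have e : sbi + (c + 1) = ii := by omega
      rw [e, hv]
    · rw [if_neg hv, if_pos h2, if_neg (fun h => hv h.symm)]
      simp only [procA, runsAux, List.foldl_cons, List.foldl_nil, bodyB, push_eq]
      have e1 : sbi + c = ii - 1 := by omega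
      have e2 : ii - 1 + 1 = ii := by omega
      rw [e1, e2]
  | cons w tail ih =>
    intro v ii sbi sb c dt h1 h2
    have hne : ii ≠ n := by
      simp only [List.length_cons] at h2; push_cast at h2; omega
    have hlen : (ii + 1) + (tail.length : Int) = n := by
      simp only [List.length_cons] at h2; push_cast at h2 ⊢; omega
    rw [procA_cons, runsAux_cons]
    by_cases hv : sb = v
    · rw [if_pos hv, if_neg hne, if_pos hv.symm]
      rw [ih w (ii + 1) sbi sb (c + 1) dt (by omega) hlen]
    · rw [if_neg hv, if_neg hne, if_neg (fun h => hv h.symm)]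
      rw [ih w (ii + 1) (ii - 1) v 1 (pushA dt sb sbi (ii - 1)) (by omega) hlen]
      simp only [List.foldl_cons, bodyB, push_eq]
      have e1 : sbi + c = ii - 1 := by omega
      rw [e1]

theorem runsAux_zero_self (x : Int) (ys : List Int) :
    runsAux x 0 (x :: ys) = runs (x :: ys) := by
  rw [runsAux_cons, if_pos rfl]
  norm_num [runs]

-- ===== new machinery relating the run-length fold to B's cuts/zip/filter passes =====

-- runs annotated with their [start, stop] ranges, starting at offset idx
def annot : Int → List (Int × Int) → List (Int × List Int)
  | _, [] => []
  | idx, (s, c) :: r => (s, [idx, idx + c]) :: annot (idx + c) r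

-- cut positions: zc prev j ys = the indices ≥ j at which the value changes
def zc : Int → Int → List Int → List Int
  | _, _, [] => []
  | prev, j, y :: ys => if prev = y then zc y (j + 1) ys else j :: zc y (j + 1) ys

theorem fold_bodyB_annot : ∀ (rs : List (Int × Int)) (idx : Int) (d : PySem.Dict Int (List (List Int))),
    (rs.foldl bodyB (idx, d)).2 =
    (annot idx rs).foldl (fun d p => d.modify p.1 [] fun x => x ++ [p.2]) d := by
  intro rs
  induction rs with
  | nil => intro idx d; rfl
  | cons p r ih =>
    intro idx d
    obtain ⟨s, c⟩ := p
    simp only [List.foldl_cons, bodyB, annot, pushB]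
    exact ih (idx + c) _

-- B's comprehension over enumerate(zip(vals, vals[1:]), 1) computes the cut positions zc
theorem enum_filter_eq_zc : ∀ (ys : List Int) (x j : Int),
    (((PySem.List.enumerate ((x :: ys).zip ys) j).filter (fun p => p.2.1 != p.2.2)).map
      (fun p => p.1)) = zc x j ys := by
  intro ys
  induction ys with
  | nil => intro x j; rfl
  | cons y ys ih =>
    intro x j
    rw [List.zip_cons_cons, PySem.List.enumerate_cons]
    by_cases h : x = y
    · simp [zc, h, ← ih y (j + 1)]
    · simp [zc, h, ← ih y (j + 1)]

def vAt (vs : List Int) (i : Int) : Int := PySem.List.pyGetD vs i 0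

theorem vAt_drop (vs ys : List Int) (y : Int) (j : Int) (h0 : 0 ≤ j)
    (hd : vs.drop j.toNat = y :: ys) : vAt vs j = y := by
  have hlt : j < (vs.length : Int) := by
    by_contra h
    rw [not_lt] at h
    have : vs.drop j.toNat = [] := List.drop_eq_nil_of_le (by omega)
    rw [this] at hd
    simp at hd
  have hget : vs[j.toNat]? = some y := by
    have h1 := List.getElem?_drop (xs := vs) (i := j.toNat) (j := 0)
    rw [hd] at h1
    simpa using h1.symm
  rw [vAt, PySem.List.pyGetD_eq_getElem vs 0 h0 hlt]
  exact Option.some_injective _ (by rw [← hget, List.getElem?_eq_getElem])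

-- the heart of the B side: annotated runs are exactly the zipped cut list, each run
-- labelled by the value at its start index
theorem annot_runsAux (vs : List Int) : ∀ (ys : List Int) (x c lo j : Int),
    j = lo + c → 1 ≤ c → 0 ≤ lo → vAt vs lo = x → vs.drop j.toNat = ys →
    annot lo (runsAux x c ys) =
      ((lo :: (zc x j ys ++ [j + (ys.length : Int)])).zip (zc x j ys ++ [j + (ys.length : Int)])).map
        (fun p => (vAt vs p.1, [p.1, p.2])) := by
  intro ys
  induction ys with
  | nil =>
    intro x c lo j h1 h2 h3 hvx hd
    simp only [runsAux, annot, zc, List.length_nil, Nat.cast_zero, Int.add_zero,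
      List.nil_append, List.zip_cons_cons, List.zip_nil_right, List.map_cons, List.map_nil,
      hvx, h1]
  | cons y ys ih =>
    intro x c lo j h1 h2 h3 hvx hd
    have hj0 : 0 ≤ j := by omega
    have hy : vAt vs j = y := vAt_drop vs ys y j hj0 hd
    have hd' : vs.drop (j + 1).toNat = ys := by
      have ht : (j + 1).toNat = j.toNat + 1 := by omega
      rw [ht, ← List.tail_drop, hd]
      rfl
    have e2 : j + ((y :: ys).length : Int) = j + 1 + (ys.length : Int) := by
      push_cast [List.length_cons]
      ring
    rw [runsAux_cons]
    by_cases h : y = x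
    · rw [if_pos h]
      rw [ih x (c + 1) lo (j + 1) (by omega) (by omega) h3 hvx hd']
      have hzc : zc x j (y :: ys) = zc x (j + 1) ys := by
        subst h
        simp [zc]
      rw [hzc, e2]
    · rw [if_neg h]
      have hzc : zc x j (y :: ys) = j :: zc y (j + 1) ys := by
        simp only [zc]
        rw [if_neg (fun hh : x = y => h hh.symm)]
      have e3 : lo + c = j := by omega
      rw [hzc, e2,
        show annot lo ((x, c) :: runsAux y 1 ys) =
          (x, [lo, lo + c]) :: annot (lo + c) (runsAux y 1 ys) from rfl, e3]
      rw [ih y 1 j (j + 1) (by ring) le_rfl hj0 hy hd']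
      simp only [List.cons_append, List.zip_cons_cons, List.map_cons, hvx]

theorem annot_map_fst : ∀ (rs : List (Int × Int)) (idx : Int),
    (annot idx rs).map (·.1) = rs.map (·.1) := by
  intro rs
  induction rs with
  | nil => intro idx; rfl
  | cons p r ih => intro idx; obtain ⟨s, c⟩ := p; simp [annot, ih]

theorem mem_runsAux_fst : ∀ (ys : List Int) (x c s : Int),
    s ∈ (runsAux x c ys).map (·.1) ↔ s = x ∨ s ∈ ys := by
  intro ys
  induction ys with
  | nil => intro x c s; simp [runsAux]
  | cons y ys ih =>
    intro x c s
    rw [runsAux_cons]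
    by_cases h : y = x
    · rw [if_pos h, ih]
      subst h
      simp
    · rw [if_neg h]
      simp only [List.map_cons, List.mem_cons, ih]

-- the two ports agree on every non-empty input
theorem ports_eq (day : List (String × Int)) (hne : day ≠ []) :
    get_time_ranges day = get_time_ranges_alt day := by
  unfold get_time_ranges get_time_ranges_alt
  rw [if_neg hne]
  simp only []
  set d := PySem.Dict.ofList day with hd
  set n : Int := (d.size : Int) with hn
  set vals := (PySem.List.pyRange 1 (n + 1) 1).map (fun i => d.getD (PySem.Int.toStr i) 0) with hvals
  -- the dict of a non-empty association list has at least one key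
  have hkeys_of : d.keys = PySem.Set.ofList (day.map (fun p => p.1)) := by
    rw [hd]
    rw [show PySem.Dict.ofList day = day.foldl (fun d p => d.insert p.1 p.2) PySem.Dict.empty from rfl]
    rw [PySem.Dict.keys_foldl_insert_key day (fun p => p.1) (fun _ p => p.2) PySem.Dict.empty,
      PySem.Dict.keys_empty, PySem.Set.ofList_eq_foldl]
    rfl
  have hsz : 1 ≤ n := by
    obtain ⟨p0, day', rfl⟩ := List.exists_cons_of_ne_nil hne
    have hmem : p0.1 ∈ d.keys := by
      rw [hkeys_of, PySem.Set.mem_ofList]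
      simp
    have hipos : 0 < d.items.length := by
      rcases hit : d.items with _ | ⟨q, items'⟩
      · rw [show d.keys = d.items.map (fun p => p.1) from rfl, hit] at hmem
        simp at hmem
      · simp
    have hsz0 : 0 < d.size := hipos
    omega
  have hlen : (vals.length : Int) = n := by
    rw [hvals, List.length_map, PySem.List.length_pyRange_one]
    omega
  obtain ⟨v, restv, hvcons⟩ : ∃ v restv, vals = v :: restv := by
    cases hv : vals with
    | nil => rw [hv] at hlen; simp at hlen; omega
    | cons a l => exact ⟨a, l, rfl⟩
  have hlen' : 1 + (restv.length : Int) = n := by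
    rw [hvcons] at hlen
    simp only [List.length_cons] at hlen
    push_cast at hlen
    omega
  have hsplit : vals = d.getD "1" 0 :: (PySem.List.pyRange 2 (n + 1) 1).map (fun i => d.getD (PySem.Int.toStr i) 0) := by
    rw [hvals, PySem.List.pyRange_one_cons (by omega : (1:Int) < n + 1), List.map_cons]
    norm_num
    rfl
  have hv1 : d.getD "1" 0 = v := by
    rw [hvcons] at hsplit
    injection hsplit with h1 h2
    exact h1.symm
  -- A side: loop → procA → run-length fold → grouped dict over annotated runs
  rw [bridge d n d.size 1 0 (d.getD "1" 0) PySem.Dict.empty (by omega)]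
  rw [← hvals, hvcons, hv1]
  rw [main_lemma n restv v 1 0 v 0 PySem.Dict.empty (by norm_num) hlen']
  rw [runsAux_zero_self]
  rw [show runs (v :: restv) = runsAux v 1 restv from rfl]
  rw [fold_bodyB_annot (runsAux v 1 restv) 0 PySem.Dict.empty]
  set L := annot 0 (runsAux v 1 restv) with hLdef
  set DD := L.foldl (fun d p => d.modify p.1 [] fun x => x ++ [p.2]) PySem.Dict.empty with hDDdef
  have hDkeys : DD.keys = PySem.Set.ofList (L.map (fun p => p.1)) := by
    rw [hDDdef, PySem.Dict.keys_foldl_modify_key L (fun p => p.1) [] (fun _ p => fun x => x ++ [p.2]) PySem.Dict.empty,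
      PySem.Dict.keys_empty, PySem.Set.ofList_eq_foldl]
    rfl
  have hDnodup : DD.keys.Nodup := by
    rw [hDDdef]
    exact PySem.Dict.nodup_keys_foldl_modify_key L (fun p => p.1) [] (fun _ p => fun x => x ++ [p.2])
      PySem.Dict.empty (by rw [PySem.Dict.keys_empty]; exact List.nodup_nil)
  have hDgetD : ∀ s : Int, DD.getD s [] = (L.filter (fun p => p.1 == s)).map (fun p => p.2) := by
    intro s
    rw [hDDdef, PySem.Dict.getD_foldl_modify_append L PySem.Dict.empty s, PySem.Dict.getD_empty,
      List.nil_append]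
  have hAs : PySem.List.sorted DD.items (fun p => p.1) false =
      (PySem.List.sorted DD.keys (fun x => x) false).map (fun k => (k, DD.getD k [])) := by
    apply PySem.List.sorted_eq_of_perm_of_pairwise_lt
    · rw [PySem.Dict.items_eq_map_keys DD hDnodup []]
      exact List.Perm.map _ (PySem.List.sorted_perm DD.keys (fun x => x) false)
    · rw [List.pairwise_map, hDkeys]
      simpa using PySem.List.sorted_ofList_pairwise_lt (L.map (fun p => p.1))
  have hperm : DD.keys.Perm (PySem.Set.ofList (v :: restv)) := by
    rw [List.perm_ext_iff_of_nodup hDnodup (PySem.Set.nodup_ofList _)]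
    intro s
    rw [hDkeys, PySem.Set.mem_ofList, PySem.Set.mem_ofList, hLdef, annot_map_fst,
      mem_runsAux_fst, List.mem_cons]
  have hsorted_keys : PySem.List.sorted DD.keys (fun x => x) false =
      PySem.List.sorted (PySem.Set.ofList (v :: restv)) (fun x => x) false :=
    PySem.List.sorted_eq_sorted_of_perm _ _ _ (fun a b h => h) hperm
  have hvAt0 : vAt (v :: restv) 0 = v := by
    rw [vAt, PySem.List.pyGetD_of_nonneg _ _ le_rfl]
    rfl
  have hLchar : L = ((0 :: (zc v 1 restv ++ [1 + (restv.length : Int)])).zip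
      (zc v 1 restv ++ [1 + (restv.length : Int)])).map
      (fun p => (vAt (v :: restv) p.1, [p.1, p.2])) := by
    rw [hLdef]
    exact annot_runsAux (v :: restv) restv v 1 0 1 (by norm_num) le_rfl le_rfl hvAt0 rfl
  -- B side: reduce the slices, the enumerate/zip cut pass and the length
  rw [PySem.List.slice_from (v :: restv) (by norm_num : (0:Int) ≤ 1)]
  simp only [Int.toNat_one, List.drop_succ_cons, List.drop_zero]
  rw [enum_filter_eq_zc restv v 1]
  rw [← hlen']
  rw [PySem.List.slice_from _ (by norm_num : (0:Int) ≤ 1)]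
  simp only [Int.toNat_one, List.drop_succ_cons, List.drop_zero]
  -- both sides are now maps over the same sorted key list; compare pointwise
  rw [hAs, hsorted_keys]
  apply List.map_congr_left
  intro s hs
  rw [hDgetD s, hLchar, List.filter_map, List.map_map]
  simp [Function.comp_def, vAt]

-- ===== VERDICT (by name: the statement is the Claim_ definition above) =====
theorem get_time_ranges_spec : Claim_equal_get_time_ranges := by
  intro day _ hpre
  unfold Spec_get_time_ranges
  exact ports_eq day hpre.1

def get_time_ranges_raises : Claim_raises_get_time_ranges := by
  unfold Claim_raises_get_time_ranges
  constructor
  · intro day _ hr hp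
    subst hr
    exact hp.1 rfl
  · exact ⟨by decide, rfl, by decide⟩
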